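-- pv_equiv track=rewrite | github.com/plymouthvan/KeywordBuilder | keyword_builder.py | generate_permutations_for_row
-- ===== SOURCE A (Python) =====
-- import itertools
-- from typing import List, Set, Iterable, Optional, Dict, Tuple
--
-- def generate_permutations_for_row(fields: List[str], min_fields: int) -> List[str]:
--     """Generates all specified permutations for a single row's fields."""
--     if not fields:
--         return []
--
--     max_len = len(fields)
--     start_len = min(min_fields, max_len) if min_fields is not None else max_len
--
--     all_perms: List[str] = []
--     for length in range(start_len, max_len + 1):
--         perms = itertools.permutations(fields, length)
--         all_perms.extend(" ".join(p) for p in perms)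
--
--     return all_perms
-- ===== SOURCE B (Python) =====
-- def _visit(buckets, start, n, parts, pool, depth):
--     nd = depth + 1
--     emit = nd >= start
--     if nd == n:
--         parts.append(pool[0])
--         buckets[nd].append(" ".join(parts))
--         parts.pop()
--         return
--     for i in range(len(pool)):
--         x = pool.pop(i)
--         parts.append(x)
--         if emit:
--             buckets[nd].append(" ".join(parts))
--         _visit(buckets, start, n, parts, pool, nd)
--         parts.pop()
--         pool.insert(i, x)
--
--
-- def generate_permutations_for_row(fields, min_fields):
--     """One depth-first traversal of the choice tree: the chosen parts are kept in a
--     single in-place list, and each visited node drops its joined string into the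
--     bucket for its length, instead of recomputing every length's permutations
--     from scratch."""
--     if not fields:
--         return []
--
--     n = len(fields)
--     start = min(min_fields, n) if min_fields is not None else n
--
--     buckets = [[] for _ in range(n + 1)]
--     if start <= 0:
--         buckets[0].append("")
--
--     _visit(buckets, start, n, [], list(fields), 0)
--
--     out = []
--     for r in range(max(start, 0), n + 1):
--         out.extend(buckets[r])
--     return out
-- ===== Notes on version B (the rewrite author's own statement) =====
-- stated objective: alternative
-- what changed: Instead of calling itertools.permutations afresh for every length, B makes one depth-first traversal of the choice tree with an in-place parts/pool pair, dropping each visited node's joined string into a per-length bucket, then concatenates the buckets from start_len up.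
import Mathlib
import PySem

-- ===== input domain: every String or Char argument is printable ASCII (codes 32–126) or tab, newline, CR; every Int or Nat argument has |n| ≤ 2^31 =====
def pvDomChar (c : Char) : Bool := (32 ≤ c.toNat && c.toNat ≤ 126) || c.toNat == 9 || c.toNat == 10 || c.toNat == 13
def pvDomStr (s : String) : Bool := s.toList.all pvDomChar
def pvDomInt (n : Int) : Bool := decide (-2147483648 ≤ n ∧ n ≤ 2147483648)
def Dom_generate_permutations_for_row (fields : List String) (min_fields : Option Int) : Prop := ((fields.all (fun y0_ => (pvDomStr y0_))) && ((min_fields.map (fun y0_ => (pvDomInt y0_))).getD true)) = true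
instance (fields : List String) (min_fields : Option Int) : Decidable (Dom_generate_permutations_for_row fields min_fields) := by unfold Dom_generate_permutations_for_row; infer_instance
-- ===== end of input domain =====

-- B replaces the per-length itertools.permutations calls by ONE depth-first traversal of
-- the choice tree that shares joined prefixes and drops each node's string into a
-- per-length bucket (objective: alternative).

-- ===== PORT A =====
def generate_permutations_for_row (fields : List String) (min_fields : Option Int) : List String :=
  if fields = [] then []
  else
    let max_len : Int := fields.length
    let start_len : Int :=
      match min_fields with
      | some m => min m max_len
      | none => max_len
    (PySem.List.pyRange start_len (max_len + 1) 1).foldl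
      (fun all_perms length =>
        all_perms ++ (PySem.List.permutations fields length.toNat).map
          (fun p => PySem.Str.join " " p))
      []

-- ===== PORT B =====
-- `buckets[i].append(v)` of Source B (buckets threaded as a value)
def pvAppendAt (bk : List (List String)) (i : Nat) (v : String) : List (List String) :=
  bk.set i (bk.getD i [] ++ [v])

-- Source B's recursive `_visit`; the fuel argument is always pool.length (pop(i) shrinks the
-- pool by one before the recursive call, insert restores it), and the in-place
-- parts.append(x) … parts.pop() pair is the value `parts ++ [x]` passed down
def pvVisit (start : Int) (n : Nat) : Nat → List String → List String → Nat → List (List String) → List (List String)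
  | 0, _, _, _, bk => bk
  | fuel + 1, parts, pool, depth, bk =>
    let nd := depth + 1
    if nd = n then
      pvAppendAt bk nd (PySem.Str.join " " (parts ++ [pool.getD 0 ""]))
    else
      (List.range pool.length).foldl
        (fun bk' i =>
          let parts' := parts ++ [pool.getD i ""]
          let bk'' := if start ≤ (nd : Int)
            then pvAppendAt bk' nd (PySem.Str.join " " parts') else bk'
          pvVisit start n fuel parts' (pool.eraseIdx i) nd bk'')
        bk

def generate_permutations_for_row_alt (fields : List String) (min_fields : Option Int) : List String :=
  if fields = [] then []
  else
    let n := fields.length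
    let start : Int :=
      match min_fields with
      | some m => min m (n : Int)
      | none => (n : Int)
    let bk0 : List (List String) := List.replicate (n + 1) []
    let bk1 := if start ≤ 0 then pvAppendAt bk0 0 "" else bk0
    let bk2 := pvVisit start n fields.length [] fields 0 bk1
    (PySem.List.pyRange (max start 0) ((n : Int) + 1) 1).foldl
      (fun out r => out ++ bk2.getD r.toNat []) []

-- ===== PRECONDITION & SPEC =====
-- Pre_ excludes only nonempty fields with a negative min_fields: there A raises
-- ValueError (itertools.permutations with negative r); A returns on everything else.
def Pre_generate_permutations_for_row (fields : List String) (min_fields : Option Int) : Prop :=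
  fields = [] ∨ 0 ≤ min_fields.getD 0
instance (fields : List String) (min_fields : Option Int) : Decidable (Pre_generate_permutations_for_row fields min_fields) := by unfold Pre_generate_permutations_for_row; infer_instance
def pvWitness_generate_permutations_for_row : List String × Option Int := (["a", "b"], some 1)

def Spec_generate_permutations_for_row (fields : List String) (min_fields : Option Int) (out : List String) : Prop := out = generate_permutations_for_row_alt fields min_fields
instance (fields : List String) (min_fields : Option Int) (out : List String) : Decidable (Spec_generate_permutations_for_row fields min_fields out) := by unfold Spec_generate_permutations_for_row; infer_instance

-- ===== CLAIM (what is proved, stated in full; the proofs are below) =====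
def Claim_equal_generate_permutations_for_row : Prop := ∀ (fields : List String) (min_fields : Option Int), Dom_generate_permutations_for_row fields min_fields → Pre_generate_permutations_for_row fields min_fields → Spec_generate_permutations_for_row fields min_fields (generate_permutations_for_row fields min_fields)

-- ===== LEMMAS AND PROOFS =====

theorem perm_succ (xs : List String) (r : Nat) : PySem.List.permutations xs (r + 1) =
    (List.range xs.length).flatMap (fun i =>
      match xs[i]? with
      | none => []
      | some x => (PySem.List.permutations (xs.eraseIdx i) r).map (fun p => x :: p)) := by
  rw [PySem.List.permutations]
  congr 1; funext i; cases xs[i]? <;> rfl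

theorem getD_of_lt (pool : List String) (i : Nat) (h : i < pool.length) :
    pool[i]? = some (pool.getD i "") := by
  rw [List.getElem?_eq_getElem h]
  simp [List.getD_eq_getElem?_getD, List.getElem?_eq_getElem h]

theorem perm_step {α : Type} (pool : List String) (k : Nat) (f : List String → α) :
    (PySem.List.permutations pool (k + 1)).map f
      = (List.range pool.length).flatMap (fun i =>
          (PySem.List.permutations (pool.eraseIdx i) k).map
            (fun w => f (pool.getD i "" :: w))) := by
  rw [perm_succ, List.map_flatMap]
  apply List.flatMap_congr
  intro i hi
  rw [getD_of_lt pool i (List.mem_range.mp hi)]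
  simp only [List.map_map]
  exact List.map_congr_left (fun q _ => rfl)

theorem pvAppendAt_length (bk : List (List String)) (i : Nat) (v : String) :
    (pvAppendAt bk i v).length = bk.length := by
  simp [pvAppendAt]

theorem pvAppendAt_getD (bk : List (List String)) (i j : Nat) (v : String) (hi : i < bk.length) :
    (pvAppendAt bk i v).getD j [] = if j = i then bk.getD i [] ++ [v] else bk.getD j [] := by
  by_cases h : j = i
  · subst h
    simp [pvAppendAt, List.getD_eq_getElem?_getD, hi]
  · simp [pvAppendAt, List.getD_eq_getElem?_getD, h, Ne.symm h]

theorem pvVisit_length (s : Int) (n : Nat) : ∀ (fuel : Nat) (parts : List String) (pool : List String)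
    (depth : Nat) (bk : List (List String)),
    (pvVisit s n fuel parts pool depth bk).length = bk.length := by
  intro fuel
  induction fuel with
  | zero => intros; rfl
  | succ f ih =>
    intro parts pool depth bk
    rw [pvVisit]
    split
    · exact pvAppendAt_length ..
    · generalize List.range pool.length = l
      induction l generalizing bk with
      | nil => rfl
      | cons i t iht =>
        simp only [List.foldl_cons]
        rw [iht, ih]
        split <;> simp [pvAppendAt_length]

theorem foldl_getD_delta (body : List (List String) → Nat → List (List String))
    (delta : Nat → List String) (L n : Nat) :
    ∀ (l : List Nat) (bk : List (List String)),
      (∀ bk' i, i ∈ l → n < bk'.length → (body bk' i).getD L [] = bk'.getD L [] ++ delta i) →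
      (∀ bk' i, (body bk' i).length = bk'.length) → n < bk.length →
      (l.foldl body bk).getD L [] = bk.getD L [] ++ l.flatMap delta := by
  intro l
  induction l with
  | nil => intro bk _ _ _; simp
  | cons i t ih =>
    intro bk h hlen hbk
    simp only [List.foldl_cons, List.flatMap_cons]
    rw [ih _ (fun bk' j hj hl => h bk' j (List.mem_cons_of_mem i hj) hl) hlen
      (by rw [hlen]; exact hbk)]
    rw [h bk i (List.mem_cons_self ..) hbk]
    simp [List.append_assoc]

theorem pvVisit_getD (s : Int) (n : Nat) (hs : s ≤ (n : Int)) :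
    ∀ (m : Nat) (pool : List String) (parts : List String) (depth : Nat)
      (bk : List (List String)) (L : Nat),
      pool.length = m → pool ≠ [] → depth + pool.length = n → n < bk.length →
      (pvVisit s n pool.length parts pool depth bk).getD L []
        = bk.getD L [] ++ (if depth + 1 ≤ L ∧ L ≤ n ∧ s ≤ (L : Int)
            then (PySem.List.permutations pool (L - depth)).map
              (fun w => PySem.Str.join " " (parts ++ w))
            else []) := by
  intro m
  induction m with
  | zero =>
    intro pool _ _ _ _ hm hne _ _
    exact absurd (List.length_eq_zero_iff.mp hm) hne
  | succ m ih =>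
    intro pool parts depth bk L hm hne hdep hbk
    rw [hm, pvVisit]
    by_cases hnd : depth + 1 = n
    · rw [if_pos hnd]
      have hlen1 : pool.length = 1 := by omega
      obtain ⟨x, hx⟩ : ∃ x, pool = [x] := by
        cases pool with
        | nil => simp at hlen1
        | cons a t =>
          cases t with
          | nil => exact ⟨a, rfl⟩
          | cons b u => simp at hlen1
      subst hx
      rw [pvAppendAt_getD _ _ _ _ (by omega)]
      by_cases hLn : L = depth + 1
      · subst hLn
        rw [if_pos rfl,
          if_pos ⟨le_refl _, by omega, by rw [← hnd] at hs; exact hs⟩]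
        rw [show depth + 1 - depth = 1 by omega]
        rw [show (1 : Nat) = 0 + 1 from rfl, perm_succ]
        simp [PySem.List.permutations, List.getD]
      · rw [if_neg hLn, if_neg (by omega)]
        simp
    · rw [if_neg hnd]
      have hm' : ∀ i, i < pool.length → (pool.eraseIdx i).length = m := by
        intro i hi
        rw [List.length_eraseIdx]
        simp [hi]; omega
      rw [foldl_getD_delta _
        (fun i => (if L = depth + 1 ∧ s ≤ ((depth + 1 : Nat) : Int)
            then [PySem.Str.join " " (parts ++ [pool.getD i ""])] else []) ++
          (if depth + 1 + 1 ≤ L ∧ L ≤ n ∧ s ≤ (L : Int)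
            then (PySem.List.permutations (pool.eraseIdx i) (L - (depth + 1))).map
              (fun w => PySem.Str.join " " ((parts ++ [pool.getD i ""]) ++ w))
            else [])) L n _ _ ?hbody ?hblen hbk]
      case hbody =>
        intro bk' i hi hbl
        have hilt : i < pool.length := List.mem_range.mp hi
        have h1 : (if s ≤ ((depth + 1 : Nat) : Int)
              then pvAppendAt bk' (depth + 1) (PySem.Str.join " " (parts ++ [pool.getD i ""])) else bk').getD L []
            = bk'.getD L [] ++ (if L = depth + 1 ∧ s ≤ ((depth + 1 : Nat) : Int)
              then [PySem.Str.join " " (parts ++ [pool.getD i ""])] else []) := by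
          by_cases h2 : s ≤ ((depth + 1 : Nat) : Int)
          · rw [if_pos h2, pvAppendAt_getD _ _ _ _ (by omega)]
            by_cases h3 : L = depth + 1
            · rw [if_pos h3, if_pos ⟨h3, h2⟩, h3]
            · rw [if_neg h3, if_neg (by tauto)]
              simp
          · rw [if_neg h2, if_neg (by tauto)]
            simp
        have hblen' : n < (if s ≤ ((depth + 1 : Nat) : Int)
            then pvAppendAt bk' (depth + 1) (PySem.Str.join " " (parts ++ [pool.getD i ""])) else bk').length := by
          split <;> simp [pvAppendAt_length, hbl]
        show (pvVisit s n m _ _ _ _).getD L [] = _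
        rw [show (m : Nat) = (pool.eraseIdx i).length from (hm' i hilt).symm]
        rw [ih (pool.eraseIdx i) _ (depth + 1) _ L (hm' i hilt)
          (by
            intro hh
            have := hm' i hilt
            rw [hh] at this
            simp at this
            omega)
          (by have := hm' i hilt; omega)
          hblen']
        rw [h1]
        simp [List.append_assoc]
      case hblen =>
        intro bk' i
        show (pvVisit s n m _ _ _ _).length = _
        rw [pvVisit_length]
        split <;> simp [pvAppendAt_length]
      congr 1
      by_cases hcL : depth + 1 ≤ L ∧ L ≤ n ∧ s ≤ (L : Int)
      · rw [if_pos hcL]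
        by_cases hL1 : L = depth + 1
        · subst hL1
          have hsd : s ≤ ((depth + 1 : Nat) : Int) := hcL.2.2
          rw [show depth + 1 - depth = 0 + 1 by omega, perm_step]
          apply List.flatMap_congr
          intro i _
          rw [if_pos ⟨rfl, hsd⟩, if_neg (by omega)]
          simp [PySem.List.permutations]
        · rw [show L - depth = (L - (depth + 1)) + 1 by omega, perm_step]
          apply List.flatMap_congr
          intro i _
          rw [if_neg (fun h => hL1 h.1), if_pos ⟨by omega, hcL.2⟩]
          simp [List.append_assoc]
      · rw [if_neg hcL]
        apply List.flatMap_eq_nil_iff.mpr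
        intro i _
        rw [if_neg (fun h => hcL ⟨by omega, by omega, by rw [h.1]; exact h.2⟩),
          if_neg (fun h => hcL ⟨by omega, h.2⟩)]
        simp

theorem join_nil_str : PySem.Str.join " " [] = "" := by
  apply String.toList_inj.mp
  simp [PySem.Str.toList_join, PySem.Chars.join_nil]

theorem core (fields : List String) (hf : fields ≠ []) (s : Int) (hs0 : 0 ≤ s)
    (hsn : s ≤ (fields.length : Int)) :
    (PySem.List.pyRange s ((fields.length : Int) + 1) 1).foldl
      (fun all_perms length =>
        all_perms ++ (PySem.List.permutations fields length.toNat).map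
          (fun p => PySem.Str.join " " p)) []
    = (PySem.List.pyRange (max s 0) ((fields.length : Int) + 1) 1).foldl
        (fun out r => out ++
          (pvVisit s fields.length fields.length [] fields 0
            (if s ≤ 0 then pvAppendAt (List.replicate (fields.length + 1) []) 0 "" else
              List.replicate (fields.length + 1) [])).getD r.toNat []) [] := by
  have hn : 0 < fields.length := List.length_pos_iff.mpr hf
  have hbk1len : fields.length <
      (if s ≤ 0 then pvAppendAt (List.replicate (fields.length + 1) []) 0 "" else
        List.replicate (fields.length + 1) []).length := by
    split <;> simp [pvAppendAt_length]
  rw [PySem.List.foldl_append_eq_flatMap, PySem.List.foldl_append_eq_flatMap,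
    max_eq_left hs0]
  simp only [List.nil_append]
  apply List.flatMap_congr
  intro r hr
  obtain ⟨hr1, hr2⟩ := (PySem.List.mem_pyRange_one).mp hr
  have h0r : 0 ≤ r := le_trans hs0 hr1
  have hLr : (r.toNat : Int) = r := Int.toNat_of_nonneg h0r
  have hv := pvVisit_getD s fields.length hsn fields.length fields [] 0
    (if s ≤ 0 then pvAppendAt (List.replicate (fields.length + 1) []) 0 "" else
      List.replicate (fields.length + 1) []) r.toNat rfl hf (by omega) hbk1len
  rw [hv]
  by_cases hL0 : r.toNat = 0
  · have hss : s = 0 := by omega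
    subst hss
    rw [hL0]
    rw [if_pos (le_refl (0 : Int))]
    rw [pvAppendAt_getD _ _ _ _ (by simp), if_pos rfl]
    rw [if_neg (by omega)]
    have hrep : (List.replicate (fields.length + 1) ([] : List String)).getD 0 [] = [] := by
      simp [List.getD_eq_getElem?_getD]
    rw [hrep]
    have hp0 : PySem.List.permutations fields 0 = [[]] := by
      rw [PySem.List.permutations]
    rw [hp0]
    simp [join_nil_str]
  · have h1L : 1 ≤ r.toNat := by omega
    have hbget : (if s ≤ 0 then pvAppendAt (List.replicate (fields.length + 1) []) 0 "" else
        List.replicate (fields.length + 1) []).getD r.toNat [] = [] := by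
      have hrlt : r.toNat < fields.length + 1 := by omega
      split
      · rw [pvAppendAt_getD _ _ _ _ (by simp), if_neg (by omega)]
        simp [List.getD_eq_getElem?_getD, hrlt]
      · simp [List.getD_eq_getElem?_getD, hrlt]
    rw [hbget]
    rw [if_pos ⟨h1L, by omega, by rw [hLr]; exact hr1⟩]
    simp only [List.nil_append, Nat.sub_zero]

-- ===== VERDICT (by name: the statement is the Claim_ definition above) =====
theorem generate_permutations_for_row_spec : Claim_equal_generate_permutations_for_row := by
  intro fields min_fields _ hpre
  unfold Spec_generate_permutations_for_row
  unfold generate_permutations_for_row generate_permutations_for_row_alt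
  by_cases hf : fields = []
  · simp [hf]
  · rw [if_neg hf, if_neg hf]
    cases min_fields with
    | none => exact core fields hf _ (by positivity) (by simp)
    | some m =>
      have hm : 0 ≤ m := by
        rcases hpre with h | h
        · exact absurd h hf
        · simpa using h
      exact core fields hf _ (le_min hm (by positivity)) (min_le_right ..)
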